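-- pv_equiv track=rewrite | github.com/matheusBertazzo/advent-of-code | 2022/day-6/src/aoc.py | get_first_marker_index
-- ===== SOURCE A (Python) =====
-- def get_first_marker_index(input: str, requiredDistinctStreak: int = 4) -> int:
--
--     currentCharIndex = 0
--     markDictionary: dict = dict()
--
--     while currentCharIndex < len(input):
--         currentChar = input[currentCharIndex]
--
--         if currentChar in markDictionary:
--             if len(markDictionary) < requiredDistinctStreak:
--                 currentCharIndex = markDictionary[currentChar] + 1
--                 markDictionary.clear()
--                 currentChar = input[currentCharIndex]
--                 markDictionary[currentChar] = currentCharIndex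
--
--         if not len(markDictionary) < requiredDistinctStreak:
--             return currentCharIndex
--
--         markDictionary[currentChar] = currentCharIndex
--         currentCharIndex += 1
--
--     return 0
-- ===== SOURCE B (Python) =====
-- def get_first_marker_index(input: str, requiredDistinctStreak: int = 4) -> int:
--     for i in range(max(requiredDistinctStreak, 0), len(input)):
--         if len(set(input[i - requiredDistinctStreak:i])) == requiredDistinctStreak:
--             return i
--     return 0
-- ===== Notes on version B (the rewrite author's own statement) =====
-- stated objective: simpler
-- what changed: Replaced A's stateful dict-with-backward-jump scan by a direct one-line scan that returns the first index i >= k whose preceding k characters form a size-k set.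
import Mathlib
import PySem

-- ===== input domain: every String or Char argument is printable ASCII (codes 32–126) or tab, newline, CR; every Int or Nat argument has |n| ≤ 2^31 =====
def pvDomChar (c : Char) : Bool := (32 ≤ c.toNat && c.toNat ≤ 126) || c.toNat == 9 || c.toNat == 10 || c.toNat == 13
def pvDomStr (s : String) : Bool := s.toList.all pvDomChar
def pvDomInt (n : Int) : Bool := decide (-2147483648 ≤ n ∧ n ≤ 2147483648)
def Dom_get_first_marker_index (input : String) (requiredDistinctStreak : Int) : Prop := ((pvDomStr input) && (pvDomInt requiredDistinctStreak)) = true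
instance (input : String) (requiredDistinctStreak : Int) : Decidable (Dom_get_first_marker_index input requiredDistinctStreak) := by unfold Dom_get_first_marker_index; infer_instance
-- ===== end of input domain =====

-- B replaces A's stateful jump-back dict scan by a direct first-index scan ("simpler"); equal return value proved on all inputs.
-- ===== PORT A =====
-- InvA, invA_*/getD_mem_values and decJump/decStep are carried solely for loopA's termination (cited by the port).
def InvA (i : Int) (d : PySem.Dict Char Int) : Prop :=
  0 ≤ i ∧ ∀ v ∈ d.values, 0 ≤ v ∧ i - (d.size : Int) ≤ v ∧ v < i

theorem invA_init : InvA 0 PySem.Dict.empty := by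
  constructor
  · omega
  · intro v hv; simp [PySem.Dict.empty, PySem.Dict.values] at hv

theorem getD_mem_values {d : PySem.Dict Char Int} {c : Char} (hc : d.contains c = true) (x : Int) :
    d.getD c x ∈ d.values := by
  rw [PySem.Dict.contains_eq_isSome_get?] at hc
  obtain ⟨v, hv⟩ := Option.isSome_iff_exists.mp hc
  rw [PySem.Dict.getD_eq_get?_getD, hv, Option.getD_some]
  have := PySem.Dict.mem_items_of_get?_eq_some d hv
  simp only [PySem.Dict.values]
  exact List.mem_map.mpr ⟨(c, v), this, rfl⟩

theorem invA_jump {i : Int} {d : PySem.Dict Char Int} (h : InvA i d)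
    {c : Char} (hc : d.contains c = true) (c2 : Char) :
    InvA (d.getD c 0 + 1 + 1) ((PySem.Dict.empty.insert c2 (d.getD c 0 + 1)).insert c2 (d.getD c 0 + 1)) := by
  obtain ⟨hp0, hp1, hp2⟩ := h.2 _ (getD_mem_values hc 0)
  rw [PySem.Dict.insert_insert_self]
  constructor
  · omega
  · intro v hv
    rcases PySem.Dict.mem_values_insert _ _ _ _ hv with rfl | hv'
    · have hsz : (PySem.Dict.empty.insert c2 (d.getD c 0 + 1)).size = 1 := by
        rw [PySem.Dict.size_insert]; simp
      rw [hsz]; push_cast; omega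
    · simp [PySem.Dict.empty, PySem.Dict.values] at hv'

theorem invA_step {i : Int} {d : PySem.Dict Char Int} (h : InvA i d)
    {c : Char} (hnc : ¬ d.contains c = true) :
    InvA (i + 1) (d.insert c i) := by
  have hsz : (d.insert c i).size = d.size + 1 := by
    rw [PySem.Dict.size_insert]; simp [hnc]
  constructor
  · have := h.1; omega
  · intro v hv
    rcases PySem.Dict.mem_values_insert _ _ _ _ hv with rfl | hv'
    · rw [hsz]; push_cast; refine ⟨h.1, by have := h.1; omega, by omega⟩
    · have := h.2 v hv'; rw [hsz]; push_cast; omega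

theorem decJump (n sz sz' : Nat) (i p : Int) (hp1 : i - (sz : Int) ≤ p) (hp2 : p < i)
    (hg : i < (n : Int)) (hsz' : sz' = 1) :
    Prod.Lex (· < ·) (· < ·)
      (((n : Int) + 1 - (p + 1 + 1 - (sz' : Int))).toNat, ((n : Int) - (p + 1 + 1)).toNat)
      (((n : Int) + 1 - (i - (sz : Int))).toNat, ((n : Int) - i).toNat) := by
  apply Prod.Lex.left
  have h2 : (0 : Int) < (n : Int) + 1 - (i - (sz : Int)) := by omega
  apply (Int.toNat_lt_toNat h2).mpr
  subst hsz'
  push_cast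
  omega

theorem decStep (n sz sz' : Nat) (i : Int) (hsz' : sz' = sz + 1) (hg : i < (n : Int)) :
    Prod.Lex (· < ·) (· < ·)
      (((n : Int) + 1 - (i + 1 - (sz' : Int))).toNat, ((n : Int) - (i + 1)).toNat)
      (((n : Int) + 1 - (i - (sz : Int))).toNat, ((n : Int) - i).toNat) := by
  have h1 : ((n : Int) + 1 - (i + 1 - (sz' : Int))).toNat
      = ((n : Int) + 1 - (i - (sz : Int))).toNat := by
    subst hsz'
    congr 1
    push_cast
    ring
  rw [h1]
  apply Prod.Lex.right
  have h2 : (0 : Int) < (n : Int) - i := by omega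
  apply (Int.toNat_lt_toNat h2).mpr
  omega

def loopA (cs : List Char) (k : Int) (i : Int) (d : PySem.Dict Char Int) (h : InvA i d) : Int :=
  if hg : i < (cs.length : Int) then
    let c := PySem.List.pyGetD cs i ' '
    if hc : d.contains c = true ∧ (d.size : Int) < k then
      -- currentCharIndex = markDictionary[currentChar] + 1; markDictionary.clear();
      -- currentChar = input[currentCharIndex]; markDictionary[currentChar] = currentCharIndex
      let i2 := d.getD c 0 + 1
      let c2 := PySem.List.pyGetD cs i2 ' '
      let d2 := PySem.Dict.empty.insert c2 i2
      if (d2.size : Int) < k then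
        loopA cs k (i2 + 1) (d2.insert c2 i2) (invA_jump h hc.1 c2)
      else i2
    else
      if hs : (d.size : Int) < k then
        loopA cs k (i + 1) (d.insert c i)
          (invA_step h (fun hcc => hc ⟨hcc, hs⟩))
      else i
  else 0
  termination_by (((cs.length : Int) + 1 - (i - (d.size : Int))).toNat, (((cs.length : Int)) - i).toNat)
  decreasing_by
  · exact decJump cs.length d.size _ i (d.getD c 0)
      (h.2 _ (getD_mem_values hc.1 0)).2.1 (h.2 _ (getD_mem_values hc.1 0)).2.2 hg
      (by show ((PySem.Dict.empty.insert c2 i2).insert c2 i2).size = 1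
          rw [PySem.Dict.insert_insert_self,
            PySem.Dict.size_insert, PySem.Dict.contains_empty]
          rfl)
  · exact decStep cs.length d.size _ i
      (by rw [PySem.Dict.size_insert]
          have hnc : d.contains c = false :=
            Bool.not_eq_true _ ▸ (fun hcc => hc ⟨hcc, hs⟩)
          rw [hnc]
          rfl) hg

def get_first_marker_index (input : String) (requiredDistinctStreak : Int) : Int :=
  loopA input.toList requiredDistinctStreak 0 PySem.Dict.empty invA_init

-- ===== PORT B =====
def condB (cs : List Char) (k : Int) (j : Int) : Bool :=
  (PySem.Set.len (PySem.Set.ofList (PySem.List.slice cs (some (j - k)) (some j))) == k)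

def bLoop (cs : List Char) (k : Int) : List Int → Int
  | [] => 0
  | j :: rest => if condB cs k j then j else bLoop cs k rest

def get_first_marker_index_alt (input : String) (requiredDistinctStreak : Int) : Int :=
  bLoop input.toList requiredDistinctStreak
    (PySem.List.pyRange (max requiredDistinctStreak 0) (PySem.Str.len input) 1)

-- ===== PRECONDITION & SPEC =====
def Spec_get_first_marker_index (input : String) (requiredDistinctStreak : Int) (out : Int) : Prop := out = get_first_marker_index_alt input requiredDistinctStreak
instance (input : String) (requiredDistinctStreak : Int) (out : Int) : Decidable (Spec_get_first_marker_index input requiredDistinctStreak out) := by unfold Spec_get_first_marker_index; infer_instance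

-- ===== CLAIM (what is proved, stated in full; the proofs are below) =====
def Claim_equal_get_first_marker_index : Prop := ∀ (input : String) (requiredDistinctStreak : Int), Dom_get_first_marker_index input requiredDistinctStreak → Spec_get_first_marker_index input requiredDistinctStreak (get_first_marker_index input requiredDistinctStreak)

-- ===== LEMMAS AND PROOFS =====
theorem map_pyGetD_range (cs : List Char) (a b : Int) (h0 : 0 ≤ a) (hab : a ≤ b)
    (hb : b ≤ (cs.length : Int)) :
    (PySem.List.pyRange a b 1).map (fun j => PySem.List.pyGetD cs j ' ')
      = (cs.drop a.toNat).take (b.toNat - a.toNat) := by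
  apply List.ext_getElem
  · simp [PySem.List.length_pyRange_one]
    omega
  · intro t h1 h2
    have ht : t < (b - a).toNat := by
      simpa [PySem.List.length_pyRange_one] using h1
    rw [List.getElem_map, PySem.List.getElem_pyRange_one]
    rw [List.getElem_take, List.getElem_drop]
    rw [PySem.List.pyGetD_eq_getElem cs ' ' (by omega) (by omega)]
    have hidx : (a + (t : Int)).toNat = a.toNat + t := by omega
    simp [hidx]

theorem slice_eq_map (cs : List Char) (a b : Int) (h0 : 0 ≤ a) (hab : a ≤ b)
    (hb : b ≤ (cs.length : Int)) :
    PySem.List.slice cs (some a) (some b)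
      = (PySem.List.pyRange a b 1).map (fun j => PySem.List.pyGetD cs j ' ') := by
  rw [PySem.List.slice_toNat cs h0 (by omega), map_pyGetD_range cs a b h0 hab hb]

theorem length_ofList_lt_of_not_nodup {α : Type} [BEq α] [LawfulBEq α] (l : List α)
    (h : ¬ l.Nodup) : (PySem.Set.ofList l).length < l.length := by
  induction l with
  | nil => simp at h
  | cons x xs ih =>
    rw [PySem.Set.ofList_cons]
    by_cases hx : x ∈ xs
    · have hx' : x ∈ PySem.Set.ofList xs := (PySem.Set.mem_ofList xs x).mpr hx
      have hlt : (PySem.Set.discard (PySem.Set.ofList xs) x).length < (PySem.Set.ofList xs).length := by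
        simp only [PySem.Set.discard]
        exact List.length_filter_lt_length_iff_exists.mpr ⟨x, hx', by simp⟩
      have := PySem.Set.length_ofList_le xs
      simp only [List.length_cons]
      omega
    · have hxs : ¬ xs.Nodup := by
        intro hnd; exact h (List.nodup_cons.mpr ⟨hx, hnd⟩)
      have hle : (PySem.Set.discard (PySem.Set.ofList xs) x).length ≤ (PySem.Set.ofList xs).length := by
        simp only [PySem.Set.discard]; exact List.length_filter_le _ _
      have := ih hxs
      simp only [List.length_cons]
      omega

theorem condB_false (cs : List Char) (k j u v : Int) (hk : 1 ≤ k) (h0 : 0 ≤ j - k)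
    (hjn : j ≤ (cs.length : Int)) (h1 : j - k ≤ u) (h2 : u < v) (h3 : v < j)
    (he : PySem.List.pyGetD cs u ' ' = PySem.List.pyGetD cs v ' ') :
    condB cs k j = false := by
  have hsl : PySem.List.slice cs (some (j - k)) (some j)
      = (PySem.List.pyRange (j - k) j 1).map (fun t => PySem.List.pyGetD cs t ' ') :=
    slice_eq_map cs (j - k) j h0 (by omega) hjn
  have hlen : ((PySem.List.pyRange (j - k) j 1).map (fun t => PySem.List.pyGetD cs t ' ')).length
      = k.toNat := by
    simp [PySem.List.length_pyRange_one]
  have hnd : ¬ ((PySem.List.pyRange (j - k) j 1).map (fun t => PySem.List.pyGetD cs t ' ')).Nodup := by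
    intro hnd
    have hu : (u - (j - k)).toNat
        < ((PySem.List.pyRange (j - k) j 1).map (fun t => PySem.List.pyGetD cs t ' ')).length := by
      rw [hlen]; omega
    have hv : (v - (j - k)).toNat
        < ((PySem.List.pyRange (j - k) j 1).map (fun t => PySem.List.pyGetD cs t ' ')).length := by
      rw [hlen]; omega
    have hgu : ((PySem.List.pyRange (j - k) j 1).map (fun t => PySem.List.pyGetD cs t ' '))[(u - (j - k)).toNat]
        = PySem.List.pyGetD cs u ' ' := by
      rw [List.getElem_map, PySem.List.getElem_pyRange_one]
      congr 1; omega
    have hgv : ((PySem.List.pyRange (j - k) j 1).map (fun t => PySem.List.pyGetD cs t ' '))[(v - (j - k)).toNat]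
        = PySem.List.pyGetD cs v ' ' := by
      rw [List.getElem_map, PySem.List.getElem_pyRange_one]
      congr 1; omega
    have : ((u - (j - k)).toNat : Nat) = (v - (j - k)).toNat :=
      (hnd.getElem_inj_iff).mp (by rw [hgu, hgv, he])
    omega
  have hlt := length_ofList_lt_of_not_nodup _ hnd
  simp only [condB, hsl, PySem.Set.len]
  rw [beq_eq_false_iff_ne]
  rw [hlen] at hlt
  omega

theorem condB_true (cs : List Char) (k i : Int) (hk : 1 ≤ k) (h0 : 0 ≤ i - k)
    (hin : i ≤ (cs.length : Int))
    (hnd : ((PySem.List.pyRange (i - k) i 1).map (fun j => PySem.List.pyGetD cs j ' ')).Nodup) :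
    condB cs k i = true := by
  have hsl : PySem.List.slice cs (some (i - k)) (some i)
      = (PySem.List.pyRange (i - k) i 1).map (fun j => PySem.List.pyGetD cs j ' ') :=
    slice_eq_map cs (i - k) i h0 (by omega) hin
  simp only [condB, hsl, PySem.Set.ofList_eq_self_of_nodup _ hnd, PySem.Set.len]
  rw [beq_iff_eq]
  simp only [PySem.List.length_pyRange_one, List.length_map]
  omega

theorem bLoop_append_false (cs : List Char) (k : Int) (l1 l2 : List Int)
    (h : ∀ j ∈ l1, condB cs k j = false) :
    bLoop cs k (l1 ++ l2) = bLoop cs k l2 := by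
  induction l1 with
  | nil => simp
  | cons x xs ih =>
    rw [List.cons_append, bLoop, h x (by simp)]
    simp only [Bool.false_eq_true, if_false]
    exact ih (fun j hj => h j (by simp [hj]))

theorem bLoop_all_false (cs : List Char) (k : Int) (l : List Int)
    (h : ∀ j ∈ l, condB cs k j = false) : bLoop cs k l = 0 := by
  have := bLoop_append_false cs k l [] h
  simpa using this

def SInv (cs : List Char) (k i : Int) (d : PySem.Dict Char Int) : Prop :=
  1 ≤ k ∧ 0 ≤ i - (d.size : Int) ∧ i ≤ (cs.length : Int) ∧ (d.size : Int) ≤ k ∧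
  d.items = (PySem.List.pyRange (i - (d.size : Int)) i 1).map
      (fun j => (PySem.List.pyGetD cs j ' ', j)) ∧
  d.keys.Nodup ∧
  ∀ j : Int, k ≤ j → j < (i - (d.size : Int)) + k → j < (cs.length : Int) →
    condB cs k j = false

theorem keys_form (cs : List Char) (k i : Int) (d : PySem.Dict Char Int)
    (hs : SInv cs k i d) :
    d.keys = (PySem.List.pyRange (i - (d.size : Int)) i 1).map
      (fun j => PySem.List.pyGetD cs j ' ') := by
  have : d.keys = d.items.map Prod.fst := rfl
  rw [this, hs.2.2.2.2.1, List.map_map]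
  rfl

theorem mem_items_facts (cs : List Char) (k i : Int) (d : PySem.Dict Char Int)
    (hs : SInv cs k i d) {c : Char} {p : Int} (hm : (c, p) ∈ d.items) :
    i - (d.size : Int) ≤ p ∧ p < i ∧ c = PySem.List.pyGetD cs p ' ' := by
  rw [hs.2.2.2.2.1] at hm
  obtain ⟨j, hj, hpair⟩ := List.mem_map.mp hm
  obtain ⟨hj1, hj2⟩ := PySem.List.mem_pyRange_one.mp hj
  obtain ⟨h1, h2⟩ := Prod.mk.injEq .. ▸ hpair
  subst h2
  exact ⟨hj1, hj2, h1.symm⟩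

theorem getD_mem_items (d : PySem.Dict Char Int) {c : Char}
    (hc : d.contains c = true) : (c, d.getD c 0) ∈ d.items := by
  rw [PySem.Dict.contains_eq_isSome_get?] at hc
  obtain ⟨v, hv⟩ := Option.isSome_iff_exists.mp hc
  rw [PySem.Dict.getD_eq_get?_getD, hv, Option.getD_some]
  exact PySem.Dict.mem_items_of_get?_eq_some d hv

theorem size_pos_of_contains (d : PySem.Dict Char Int) {c : Char}
    (hc : d.contains c = true) : 1 ≤ d.size := by
  have hm := getD_mem_items d hc
  have : d.size = d.items.length := rfl
  rw [this]
  exact List.length_pos_of_mem hm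

theorem sinv_jump (cs : List Char) (k i : Int) (d : PySem.Dict Char Int)
    (hs : SInv cs k i d) (hg : i < (cs.length : Int))
    (hc1 : d.contains (PySem.List.pyGetD cs i ' ') = true)
    (hc2 : (d.size : Int) < k) :
    SInv cs k (d.getD (PySem.List.pyGetD cs i ' ') 0 + 1 + 1)
      ((PySem.Dict.empty.insert
          (PySem.List.pyGetD cs (d.getD (PySem.List.pyGetD cs i ' ') 0 + 1) ' ')
          (d.getD (PySem.List.pyGetD cs i ' ') 0 + 1)).insert
        (PySem.List.pyGetD cs (d.getD (PySem.List.pyGetD cs i ' ') 0 + 1) ' ')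
        (d.getD (PySem.List.pyGetD cs i ' ') 0 + 1)) := by
  obtain ⟨hk, hs0, hin, hsk, hitems, hnd, hmark⟩ := hs
  set c := PySem.List.pyGetD cs i ' ' with hcdef
  set p := d.getD c 0 with hpdef
  obtain ⟨hp1, hp2, hp3⟩ := mem_items_facts cs k i d
    ⟨hk, hs0, hin, hsk, hitems, hnd, hmark⟩ (getD_mem_items d hc1)
  have hszpos : 1 ≤ d.size := size_pos_of_contains d hc1
  have hk2 : 2 ≤ k := by omega
  set c2 := PySem.List.pyGetD cs (p + 1) ' ' with hc2def
  rw [PySem.Dict.insert_insert_self]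
  have hitems2 : (PySem.Dict.empty.insert c2 (p + 1)).items = [(c2, p + 1)] := by
    rw [PySem.Dict.items_insert_of_not_contains _ _ (by simp [PySem.Dict.contains_empty])]
    rfl
  have hsz2 : ((PySem.Dict.empty.insert c2 (p + 1)).size : Int) = 1 := by
    have : (PySem.Dict.empty.insert c2 (p + 1)).size = (PySem.Dict.empty.insert c2 (p + 1)).items.length := rfl
    rw [this, hitems2]
    rfl
  refine ⟨hk, by rw [hsz2]; omega, by omega, by rw [hsz2]; omega, ?_, ?_, ?_⟩
  · rw [hitems2, hsz2]
    have : p + 1 + 1 - 1 = p + 1 := by omega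
    rw [this, PySem.List.pyRange_one_singleton]
    rfl
  · have : (PySem.Dict.empty.insert c2 (p + 1)).keys = [c2] := by
      have hkeys : (PySem.Dict.empty.insert c2 (p + 1)).keys
          = (PySem.Dict.empty.insert c2 (p + 1)).items.map Prod.fst := rfl
      rw [hkeys, hitems2]
      rfl
    rw [this]
    exact List.nodup_singleton _
  · intro j hj1 hj2 hj3
    rw [hsz2] at hj2
    by_cases hjs : j < (i - (d.size : Int)) + k
    · exact hmark j hj1 hjs hj3
    · exact condB_false cs k j p i hk (by omega) (by omega) (by omega) (by omega)
        (by omega) (by rw [← hp3])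

theorem sinv_step (cs : List Char) (k i : Int) (d : PySem.Dict Char Int)
    (hs : SInv cs k i d) (hg : i < (cs.length : Int))
    (hnc : ¬ d.contains (PySem.List.pyGetD cs i ' ') = true)
    (hsl : (d.size : Int) < k) :
    SInv cs k (i + 1) (d.insert (PySem.List.pyGetD cs i ' ') i) := by
  obtain ⟨hk, hs0, hin, hsk, hitems, hnd, hmark⟩ := hs
  set c := PySem.List.pyGetD cs i ' ' with hcdef
  have hsz : ((d.insert c i).size : Int) = (d.size : Int) + 1 := by
    rw [PySem.Dict.size_insert]
    simp [hnc]
  refine ⟨hk, by omega, by omega, by omega, ?_, ?_, ?_⟩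
  · rw [PySem.Dict.items_insert_of_not_contains _ _ (by simpa using hnc), hitems, hsz]
    have h1 : i + 1 - ((d.size : Int) + 1) = i - (d.size : Int) := by omega
    rw [h1, PySem.List.pyRange_one_succ_right (by omega), List.map_append]
    rfl
  · rw [PySem.Dict.keys_insert_of_not_contains _ _ (by simpa using hnc)]
    refine List.Nodup.append hnd (List.nodup_singleton _) ?_
    intro a ha hb
    simp only [List.mem_singleton] at hb
    subst hb
    exact hnc ((PySem.Dict.contains_iff_mem_keys d c).mpr ha)
  · intro j hj1 hj2 hj3
    rw [hsz] at hj2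
    have : i + 1 - ((d.size : Int) + 1) + k = (i - (d.size : Int)) + k := by omega
    exact hmark j hj1 (by omega) hj3

theorem bLoop_ret (cs : List Char) (k i : Int) (hk : 1 ≤ k) (hki : k ≤ i)
    (hin : i < (cs.length : Int)) (ht : condB cs k i = true)
    (hprev : ∀ j : Int, k ≤ j → j < i → condB cs k j = false) :
    bLoop cs k (PySem.List.pyRange k (cs.length : Int) 1) = i := by
  rw [PySem.List.pyRange_one_append k i (cs.length : Int) hki (by omega)]
  rw [bLoop_append_false cs k _ _ (fun j hj => by
    obtain ⟨h1, h2⟩ := PySem.List.mem_pyRange_one.mp hj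
    exact hprev j h1 h2)]
  rw [PySem.List.pyRange_one_cons hin, bLoop, ht]
  simp

theorem loopA_eq (cs : List Char) (k : Int) : ∀ (i : Int) (d : PySem.Dict Char Int)
    (h : InvA i d), SInv cs k i d →
    loopA cs k i d h = bLoop cs k (PySem.List.pyRange k (cs.length : Int) 1) := by
  intro i d h
  induction i, d, h using loopA.induct cs k with
  | case1 i d h hg c hc i2 c2 d2 hlt ih =>
    intro hs
    rw [loopA, dif_pos hg, dif_pos hc, if_pos hlt]
    exact ih (sinv_jump cs k i d hs hg hc.1 hc.2)
  | case2 i d h hg c hc i2 c2 d2 hnlt =>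
    intro hs
    exfalso
    have hszpos : 1 ≤ d.size := size_pos_of_contains d hc.1
    have h1 : ((d2 : PySem.Dict Char Int).size : Int) = 1 := by
      show (((PySem.Dict.empty.insert c2 i2).size : Nat) : Int) = 1
      rw [PySem.Dict.size_insert]
      simp [PySem.Dict.contains_empty]
    rw [h1] at hnlt
    have := hc.2
    omega
  | case3 i d h hg c hc hsl ih =>
    intro hs
    rw [loopA, dif_pos hg, dif_neg hc, dif_pos hsl]
    exact ih (sinv_step cs k i d hs hg (fun hcc => hc ⟨hcc, hsl⟩) hsl)
  | case4 i d h hg c hc hns =>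
    intro hs
    rw [loopA, dif_pos hg, dif_neg hc, dif_neg hns]
    obtain ⟨hk, hs0, hin, hsk, hitems, hnd, hmark⟩ := hs
    have hsize : (d.size : Int) = k := by omega
    have hkform := keys_form cs k i d ⟨hk, hs0, hin, hsk, hitems, hnd, hmark⟩
    refine (bLoop_ret cs k i hk (by omega) hg ?_ ?_).symm
    · refine condB_true cs k i hk (by omega) (by omega) ?_
      have : i - k = i - (d.size : Int) := by omega
      rw [this, ← hkform]
      exact hnd
    · intro j hj1 hj2
      exact hmark j hj1 (by omega) (by omega)
  | case5 i d h hg =>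
    intro hs
    rw [loopA, dif_neg hg]
    obtain ⟨hk, hs0, hin, hsk, hitems, hnd, hmark⟩ := hs
    refine (bLoop_all_false cs k _ (fun j hj => ?_)).symm
    obtain ⟨h1, h2⟩ := PySem.List.mem_pyRange_one.mp hj
    exact hmark j h1 (by omega) h2

theorem spec_main : ∀ (input : String) (k : Int),
    get_first_marker_index input k = get_first_marker_index_alt input k := by
  intro input k
  unfold get_first_marker_index get_first_marker_index_alt
  rw [PySem.Str.len_eq]
  by_cases hk : 1 ≤ k
  · rw [show max k 0 = k by omega]
    refine loopA_eq input.toList k 0 PySem.Dict.empty invA_init ?_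
    refine ⟨hk, by simp [PySem.Dict.size_empty], by omega, by simp [PySem.Dict.size_empty]; omega, ?_, ?_, ?_⟩
    · have h0 : (((PySem.Dict.empty : PySem.Dict Char Int).size : Nat) : Int) = 0 := by
        rw [PySem.Dict.size_empty]
        rfl
      rw [h0, PySem.List.pyRange_one_eq_nil (by omega), List.map_nil]
      rfl
    · simp [PySem.Dict.keys_empty]
    · intro j hj1 hj2 hj3
      simp [PySem.Dict.size_empty] at hj2
      omega
  · have hA : loopA input.toList k 0 PySem.Dict.empty invA_init = 0 := by
      rw [loopA]
      by_cases hn : (0 : Int) < (input.toList.length : Int)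
      · rw [dif_pos hn, dif_neg (by simp [PySem.Dict.contains_empty]),
          dif_neg (by rw [PySem.Dict.size_empty]; omega)]
      · rw [dif_neg hn]
    rw [hA, show max k 0 = 0 by omega]
    rcases lt_or_eq_of_le (not_lt.mp (by omega : ¬ (0:Int) < k)) with hk0 | hk0
    · refine (bLoop_all_false _ _ _ (fun j hj => ?_)).symm
      simp only [condB, PySem.Set.len, beq_eq_false_iff_ne]
      omega
    · subst hk0
      by_cases hn : (0 : Int) < (input.toList.length : Int)
      · rw [PySem.List.pyRange_one_cons hn, bLoop]
        have : condB input.toList 0 0 = true := by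
          simp only [condB]
          rw [show (0:Int) - 0 = 0 by omega, PySem.List.slice_toNat _ (by omega) (by omega)]
          simp [PySem.Set.len, PySem.Set.ofList]
        rw [this]
        simp
      · rw [PySem.List.pyRange_one_eq_nil (by omega), bLoop]

-- ===== VERDICT (by name: the statement is the Claim_ definition above) =====
theorem get_first_marker_index_spec : Claim_equal_get_first_marker_index := by
  intro input k _
  exact spec_main input k
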